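-- pv_equiv track=rewrite | github.com/kelvinhuang0327/number-pattern-research | tools/backtest_biglotto_triple_strike_original.py | tail_balance_bet
-- ===== SOURCE A (Python) =====
-- from collections import Counter
--
-- def tail_balance_bet(history, window=100, exclude=None):
--     if exclude is None: exclude = set()
--     recent = history[-window:]
--     all_nums = [n for d in recent for n in d['numbers']]
--     freq = Counter(all_nums)
--     tail_groups = {i: [] for i in range(10)}
--     for n in range(1, 50):
--         if n not in exclude:
--             tail_groups[n % 10].append((n, freq.get(n, 0)))
--     for t in tail_groups: tail_groups[t].sort(key=lambda x: x[1], reverse=True)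
--     selected = []
--     available_tails = sorted([t for t in range(10) if tail_groups[t]], key=lambda t: tail_groups[t][0][1], reverse=True)
--     idx_in_group = {t: 0 for t in range(10)}
--     while len(selected) < 6:
--         for tail in available_tails:
--             if len(selected) >= 6: break
--             if idx_in_group[tail] < len(tail_groups[tail]):
--                 num = tail_groups[tail][idx_in_group[tail]][0]
--                 if num not in selected:
--                     selected.append(num)
--                     idx_in_group[tail] += 1
--         if all(idx_in_group[t] >= len(tail_groups[t]) for t in available_tails): break
--     return sorted(selected[:6])
-- ===== SOURCE B (Python) =====
-- from collections import Counter
--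
-- def tail_balance_bet(history, window=100, exclude=None):
--     if exclude is None: exclude = set()
--     freq = Counter(n for d in history[-window:] for n in d['numbers'])
--     groups = {t: sorted(((n, freq[n]) for n in range(1, 50) if n % 10 == t and n not in exclude),
--                         key=lambda p: p[1], reverse=True)
--               for t in range(10)}
--     tails = sorted((t for t in range(10) if groups[t]),
--                    key=lambda t: groups[t][0][1], reverse=True)
--     entries = sorted(((rank * 10 + pri, n)
--                       for pri, t in enumerate(tails)
--                       for rank, (n, _) in enumerate(groups[t])),
--                      key=lambda e: e[0])
--     return sorted(n for _, n in entries[:6])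
-- ===== Notes on version B (the rewrite author's own statement) =====
-- stated objective: simpler
-- what changed: A's round-robin selection (while loop over tail groups with per-group cursors idx_in_group, a membership test and an all(...) exhaustion check) is replaced by emitting each candidate once with key rank-within-group*10 + tail-priority and doing a single stable sort, taking the first 6.
import Mathlib
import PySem

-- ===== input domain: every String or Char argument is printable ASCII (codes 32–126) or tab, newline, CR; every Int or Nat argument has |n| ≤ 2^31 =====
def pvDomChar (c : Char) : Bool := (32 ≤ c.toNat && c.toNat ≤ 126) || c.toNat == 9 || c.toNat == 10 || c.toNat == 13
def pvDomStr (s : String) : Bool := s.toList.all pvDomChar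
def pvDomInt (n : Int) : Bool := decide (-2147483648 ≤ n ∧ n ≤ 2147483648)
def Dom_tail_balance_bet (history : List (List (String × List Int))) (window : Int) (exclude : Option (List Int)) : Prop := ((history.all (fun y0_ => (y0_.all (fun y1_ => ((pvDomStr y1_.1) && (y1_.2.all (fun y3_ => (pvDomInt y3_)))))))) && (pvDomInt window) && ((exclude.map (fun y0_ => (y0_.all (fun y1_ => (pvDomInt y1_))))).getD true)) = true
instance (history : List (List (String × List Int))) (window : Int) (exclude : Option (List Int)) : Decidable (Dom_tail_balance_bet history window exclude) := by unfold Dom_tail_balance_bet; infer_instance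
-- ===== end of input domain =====

-- B replaces A's round-robin while-loop selection (idx_in_group cursors + exhaustion check)
-- by one flat stable sort of (rank-within-group, tail-priority) entries; same return value.

-- ===== PORT A =====
-- the while-loop body: one pass of `for tail in available_tails` (break ≙ the length guard)
def tbbStep (G : PySem.Dict Int (List (Int × Int))) (st : List Int × PySem.Dict Int Int) (tail : Int) : List Int × PySem.Dict Int Int :=
  if 6 ≤ st.1.length then st
  else if st.2.getD tail 0 < ((G.getD tail []).length : Int) then
    let num := (PySem.List.pyGetD (G.getD tail []) (st.2.getD tail 0) (0, 0)).1
    if st.1.contains num then st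
    else (st.1 ++ [num], st.2.modify tail 0 (· + 1))
  else st

-- `while len(selected) < 6: … if all(…): break` — fuel 7 bounds the ≤ 6 productive rounds + final check
def tbbWhile (G : PySem.Dict Int (List (Int × Int))) (av : List Int) : Nat → List Int → PySem.Dict Int Int → List Int
  | 0, selected, _ => selected
  | fuel+1, selected, idx =>
    if selected.length < 6 then
      let st := av.foldl (tbbStep G) (selected, idx)
      if av.all (fun t => decide (((G.getD t []).length : Int) ≤ st.2.getD t 0)) then st.1
      else tbbWhile G av fuel st.1 st.2
    else selected

def tail_balance_bet (history : List (List (String × List Int))) (window : Int) (exclude : Option (List Int)) : List Int :=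
  let excl : List Int := exclude.getD []
  let recent := PySem.List.slice history (some (-window)) none
  let all_nums := recent.flatMap (fun d => (List.lookup "numbers" d).getD [])
  let freq := PySem.Dict.counter all_nums
  let tail_groups0 : PySem.Dict Int (List (Int × Int)) := (PySem.List.pyRange 0 10 1).foldl (fun d i => d.insert i []) PySem.Dict.empty
  let tail_groups1 := (PySem.List.pyRange 1 50 1).foldl (fun d n => if excl.contains n then d else d.modify (PySem.Int.mod n 10) [] (fun l => l ++ [(n, freq.getD n 0)])) tail_groups0
  let tail_groups := tail_groups1.keys.foldl (fun d t => d.modify t [] (fun l => PySem.List.sorted l (fun x => x.2) true)) tail_groups1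
  let available_tails := PySem.List.sorted ((PySem.List.pyRange 0 10 1).filter (fun t => !(tail_groups.getD t []).isEmpty)) (fun t => (PySem.List.pyGetD (tail_groups.getD t []) 0 (0, 0)).2) true
  let idx0 : PySem.Dict Int Int := (PySem.List.pyRange 0 10 1).foldl (fun d t => d.insert t 0) PySem.Dict.empty
  let selected := tbbWhile tail_groups available_tails 7 [] idx0
  PySem.List.sorted (PySem.List.slice selected none (some 6)) (fun x => x) false

-- ===== PORT B =====
def tail_balance_bet_alt (history : List (List (String × List Int))) (window : Int) (exclude : Option (List Int)) : List Int :=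
  let excl : List Int := exclude.getD []
  let freq := PySem.Dict.counter ((PySem.List.slice history (some (-window)) none).flatMap (fun d => (List.lookup "numbers" d).getD []))
  let groups : PySem.Dict Int (List (Int × Int)) := (PySem.List.pyRange 0 10 1).foldl (fun d t => d.insert t (PySem.List.sorted (((PySem.List.pyRange 1 50 1).filter (fun n => PySem.Int.mod n 10 == t && !excl.contains n)).map (fun n => (n, freq.getD n 0))) (fun p => p.2) true)) PySem.Dict.empty
  let tails := PySem.List.sorted ((PySem.List.pyRange 0 10 1).filter (fun t => !(groups.getD t []).isEmpty)) (fun t => (PySem.List.pyGetD (groups.getD t []) 0 (0, 0)).2) true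
  let entries := PySem.List.sorted ((PySem.List.enumerate tails 0).flatMap (fun pt => (PySem.List.enumerate (groups.getD pt.2 []) 0).map (fun rp => (rp.1 * 10 + pt.1, rp.2.1)))) (fun e => e.1) false
  PySem.List.sorted ((PySem.List.slice entries none (some 6)).map (fun e => e.2)) (fun x => x) false

-- ===== PRECONDITION & SPEC =====
-- Pre_ excludes exactly the inputs where some round in the last `window` draws lacks the key
-- 'numbers', on which Python A raises KeyError.
def Pre_tail_balance_bet (history : List (List (String × List Int))) (window : Int) (exclude : Option (List Int)) : Prop :=
  ∀ d ∈ PySem.List.slice history (some (-window)) none, (List.lookup "numbers" d).isSome = true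
instance (history : List (List (String × List Int))) (window : Int) (exclude : Option (List Int)) : Decidable (Pre_tail_balance_bet history window exclude) := by unfold Pre_tail_balance_bet; infer_instance

def pvWitness_tail_balance_bet : (List (List (String × List Int))) × Int × Option (List Int) :=
  ([[("numbers", [1, 2, 3])], [("numbers", [2, 13])]], 100, some [2])

def Spec_tail_balance_bet (history : List (List (String × List Int))) (window : Int) (exclude : Option (List Int)) (out : List Int) : Prop := out = tail_balance_bet_alt history window exclude
instance (history : List (List (String × List Int))) (window : Int) (exclude : Option (List Int)) (out : List Int) : Decidable (Spec_tail_balance_bet history window exclude out) := by unfold Spec_tail_balance_bet; infer_instance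

-- ===== CLAIM (what is proved, stated in full; the proofs are below) =====
def Claim_equal_tail_balance_bet : Prop := ∀ (history : List (List (String × List Int))) (window : Int) (exclude : Option (List Int)), Dom_tail_balance_bet history window exclude → Pre_tail_balance_bet history window exclude → Spec_tail_balance_bet history window exclude (tail_balance_bet history window exclude)

-- ===== LEMMAS AND PROOFS =====

-- proof-side abbreviations for the shared prefix of both ports
def pvEx (exclude : Option (List Int)) : List Int := exclude.getD []
def pvFr (history : List (List (String × List Int))) (window : Int) : PySem.Dict Int Int :=
  PySem.Dict.counter ((PySem.List.slice history (some (-window)) none).flatMap (fun d => (List.lookup "numbers" d).getD []))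
def pvPairs (ex : List Int) (fr : PySem.Dict Int Int) (t : Int) : List (Int × Int) :=
  PySem.List.sorted (((PySem.List.pyRange 1 50 1).filter (fun n => PySem.Int.mod n 10 == t && !ex.contains n)).map (fun n => (n, fr.getD n 0))) (fun p => p.2) true
def pvG (ex : List Int) (fr : PySem.Dict Int Int) : PySem.Dict Int (List (Int × Int)) :=
  (PySem.List.pyRange 0 10 1).foldl (fun d t => d.insert t (pvPairs ex fr t)) PySem.Dict.empty
def pvAv (ex : List Int) (fr : PySem.Dict Int Int) : List Int :=
  PySem.List.sorted ((PySem.List.pyRange 0 10 1).filter (fun t => !((pvG ex fr).getD t []).isEmpty)) (fun t => (PySem.List.pyGetD ((pvG ex fr).getD t []) 0 (0, 0)).2) true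

-- the emission order both programs realise: rank-major, tail-priority-minor
def pvGt (G : PySem.Dict Int (List (Int × Int))) (t : Int) : List Int := (G.getD t []).map (fun p => p.1)
def pvRow (G : PySem.Dict Int (List (Int × Int))) (av : List Int) (r : Nat) : List Int := av.filterMap (fun t => (pvGt G t)[r]?)
def pvPref (G : PySem.Dict Int (List (Int × Int))) (av : List Int) (j : Nat) : List Int := (List.range j).flatMap (pvRow G av)
def pvOut (ex : List Int) (fr : PySem.Dict Int Int) : List Int :=
  PySem.List.sorted ((pvPref (pvG ex fr) (pvAv ex fr) 5).take 6) (fun x => x) false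

structure PvH (G : PySem.Dict Int (List (Int × Int))) (av : List Int) : Prop where
  nd : av.Nodup
  tail_eq : ∀ t ∈ av, ∀ n ∈ pvGt G t, PySem.Int.mod n 10 = t
  ndg : ∀ t, (pvGt G t).Nodup
  len5 : ∀ t ∈ av, (pvGt G t).length ≤ 5
  len10 : av.length ≤ 10

-- generic dict-fold lemmas
theorem pv_getD_foldl_insert_fun {κ ν : Type} [BEq κ] [LawfulBEq κ] [DecidableEq κ]
    (ks : List κ) (hnd : ks.Nodup) (v : κ → ν) (d : PySem.Dict κ ν) (t : κ) (dflt : ν) :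
    (ks.foldl (fun d k => d.insert k (v k)) d).getD t dflt = if t ∈ ks then v t else d.getD t dflt := by
  induction ks generalizing d with
  | nil => simp
  | cons k ks ih =>
    rcases List.nodup_cons.mp hnd with ⟨hk, hnd'⟩
    rw [List.foldl_cons, ih hnd']
    by_cases ht : t ∈ ks
    · simp [ht, List.mem_cons]
    · by_cases htk : t = k
      · subst htk; simp [ht, PySem.Dict.getD_insert_self]
      · simp [ht, htk, PySem.Dict.getD_insert_of_ne d _ _ htk]

theorem pv_getD_foldl_modify_fun {κ ν : Type} [BEq κ] [LawfulBEq κ] [DecidableEq κ]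
    (ks : List κ) (hnd : ks.Nodup) (f : ν → ν) (d0 : ν) (d : PySem.Dict κ ν) (t : κ) :
    (ks.foldl (fun d k => d.modify k d0 f) d).getD t d0 = if t ∈ ks then f (d.getD t d0) else d.getD t d0 := by
  induction ks generalizing d with
  | nil => simp
  | cons k ks ih =>
    rcases List.nodup_cons.mp hnd with ⟨hk, hnd'⟩
    rw [List.foldl_cons, ih hnd']
    by_cases ht : t ∈ ks
    · have htk : t ≠ k := fun h => hk (h ▸ ht)
      simp [ht, PySem.Dict.getD_modify_of_ne d d0 f htk]
    · by_cases htk : t = k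
      · subst htk; simp [ht, PySem.Dict.getD_modify_self]
      · simp [ht, htk, PySem.Dict.getD_modify_of_ne d d0 f htk]

theorem pv_flatMap_append_perm {α β : Type} (xs : List α) (A B : α → List β) :
    (xs.flatMap (fun x => A x ++ B x)).Perm (xs.flatMap A ++ xs.flatMap B) := by
  induction xs with
  | nil => simp
  | cons x xs ih =>
    simp only [List.flatMap_cons]
    refine (ih.append_left (A x ++ B x)).trans ?_
    rw [List.append_assoc, List.append_assoc]
    exact (List.perm_append_comm_assoc _ _ _).append_left _

theorem pv_flatMap_getElem {β : Type} (l : List β) (k : Nat) (h : l.length ≤ k) :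
    (List.range k).flatMap (fun r => (l[r]?).toList) = l := by
  induction l generalizing k with
  | nil => simp
  | cons a l ih =>
    cases k with
    | zero => simp at h
    | succ k' =>
      rw [List.range_succ_eq_map]
      simp only [List.flatMap_cons, List.flatMap_map, List.getElem?_cons_zero,
        List.getElem?_cons_succ, Option.toList_some]
      rw [show (fun r => (l[r]?).toList) = fun r => (l[r]?).toList from rfl]
      rw [ih k' (by simpa using h)]
      rfl

theorem pv_transpose {β : Type} (L : List (List β)) (k : Nat) (h : ∀ l ∈ L, l.length ≤ k) :
    ((List.range k).flatMap (fun r => L.filterMap (fun l => l[r]?))).Perm L.flatten := by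
  induction L with
  | nil => simp
  | cons l L ih =>
    have hfun : (fun (r : Nat) => (l :: L).filterMap (fun l => l[r]?))
        = (fun (r : Nat) => (l[r]?).toList ++ L.filterMap (fun l => l[r]?)) := by
      funext r
      rw [List.filterMap_cons]
      cases l[r]? <;> simp
    rw [hfun, List.flatten_cons]
    refine (pv_flatMap_append_perm _ _ _).trans ?_
    rw [pv_flatMap_getElem l k (h l List.mem_cons_self)]
    exact (ih (fun l' hl' => h l' (List.mem_cons_of_mem _ hl'))).append_left _

theorem pv_row_snd (av : List Int) (s : Int) (F : Int → Option Int) (kf : Int → Int) :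
    ((PySem.List.enumerate av s).filterMap (fun pt => (F pt.2).map (fun n => (kf pt.1, n)))).map (fun e => e.2) = av.filterMap F := by
  induction av generalizing s with
  | nil => simp [PySem.List.enumerate]
  | cons a av ih =>
    rw [PySem.List.enumerate_cons, List.filterMap_cons, List.filterMap_cons]
    cases hF : F a with
    | none => simp only [Option.map_none]; exact ih (s+1)
    | some n => simp only [Option.map_some, List.map_cons]; rw [ih (s+1)]

-- facts about the shared dict / tails
theorem pv_pvG_getD (ex : List Int) (fr : PySem.Dict Int Int) (t : Int) :
    (pvG ex fr).getD t [] = if t ∈ PySem.List.pyRange 0 10 1 then pvPairs ex fr t else [] := by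
  unfold pvG
  rw [pv_getD_foldl_insert_fun _ (PySem.List.nodup_pyRange_one 0 10) (pvPairs ex fr) _ t []]
  split
  · rfl
  · exact PySem.Dict.getD_empty t []

theorem pv_pairs_fst (ex : List Int) (fr : PySem.Dict Int Int) (t : Int) :
    ((pvPairs ex fr t).map (fun p => p.1)).Perm ((PySem.List.pyRange 1 50 1).filter (fun n => PySem.Int.mod n 10 == t && !ex.contains n)) := by
  unfold pvPairs
  have h := (PySem.List.sorted_perm (((PySem.List.pyRange 1 50 1).filter (fun n => PySem.Int.mod n 10 == t && !ex.contains n)).map (fun n => (n, fr.getD n 0))) (fun p => p.2) true).map (fun p => p.1)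
  rw [List.map_map] at h
  have h2 : List.map ((fun (p : Int × Int) => p.1) ∘ fun n => (n, fr.getD n 0)) ((PySem.List.pyRange 1 50 1).filter (fun n => PySem.Int.mod n 10 == t && !ex.contains n)) = (PySem.List.pyRange 1 50 1).filter (fun n => PySem.Int.mod n 10 == t && !ex.contains n) := by
    rw [show ((fun (p : Int × Int) => p.1) ∘ fun n => (n, fr.getD n 0)) = fun (n : Int) => n from rfl, List.map_id']
  rw [h2] at h
  exact h

theorem pv_avmem (ex : List Int) (fr : PySem.Dict Int Int) (t : Int) (ht : t ∈ pvAv ex fr) : 0 ≤ t ∧ t < 10 := by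
  rw [pvAv, PySem.List.mem_sorted, List.mem_filter] at ht
  exact PySem.List.mem_pyRange_one.mp ht.1

theorem pv_H (ex : List Int) (fr : PySem.Dict Int Int) : PvH (pvG ex fr) (pvAv ex fr) := by
  constructor
  · have hp := PySem.List.sorted_perm ((PySem.List.pyRange 0 10 1).filter (fun t => !((pvG ex fr).getD t []).isEmpty)) (fun t => (PySem.List.pyGetD ((pvG ex fr).getD t []) 0 (0, 0)).2) true
    exact hp.nodup_iff.mpr ((PySem.List.nodup_pyRange_one 0 10).filter _)
  · intro t ht n hn
    rw [pvGt, pv_pvG_getD, if_pos (PySem.List.mem_pyRange_one.mpr (pv_avmem ex fr t ht))] at hn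
    have hm := (pv_pairs_fst ex fr t).mem_iff.mp hn
    rw [List.mem_filter] at hm
    have hb := hm.2
    simp only [Bool.and_eq_true, beq_iff_eq] at hb
    exact hb.1
  · intro t
    rw [pvGt, pv_pvG_getD]
    split
    · exact (pv_pairs_fst ex fr t).nodup_iff.mpr ((PySem.List.nodup_pyRange_one 1 50).filter _)
    · simp
  · intro t ht
    obtain ⟨h0, h10⟩ := pv_avmem ex fr t ht
    rw [pvGt, List.length_map, pv_pvG_getD, if_pos (PySem.List.mem_pyRange_one.mpr ⟨h0, h10⟩)]
    rw [pvPairs, PySem.List.length_sorted, List.length_map]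
    have hsub : ((PySem.List.pyRange 1 50 1).filter (fun n => PySem.Int.mod n 10 == t && !ex.contains n)).Sublist ((PySem.List.pyRange 1 50 1).filter (fun n => PySem.Int.mod n 10 == t)) :=
      List.monotone_filter_right _ (fun a ha => by
        simp only [Bool.and_eq_true] at ha; exact ha.1)
    refine le_trans hsub.length_le ?_
    interval_cases t <;> decide
  · rw [pvAv, PySem.List.length_sorted]
    refine le_trans (List.length_filter_le _ _) ?_
    rw [PySem.List.length_pyRange_one]
    decide

-- A's three dict-building stages produce pvG
theorem pv_A_dict (ex : List Int) (fr : PySem.Dict Int Int) :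
    (((PySem.List.pyRange 1 50 1).foldl (fun d n => if ex.contains n then d else d.modify (PySem.Int.mod n 10) [] (fun l => l ++ [(n, fr.getD n 0)])) ((PySem.List.pyRange 0 10 1).foldl (fun d i => d.insert i []) PySem.Dict.empty)).keys.foldl (fun d t => d.modify t [] (fun l => PySem.List.sorted l (fun x => x.2) true)) ((PySem.List.pyRange 1 50 1).foldl (fun d n => if ex.contains n then d else d.modify (PySem.Int.mod n 10) [] (fun l => l ++ [(n, fr.getD n 0)])) ((PySem.List.pyRange 0 10 1).foldl (fun d i => d.insert i []) PySem.Dict.empty))) = pvG ex fr := by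
  have hupd : ∀ (ks xs : List Int), (∀ x ∈ xs, x ∈ ks) → PySem.Set.update ks xs = ks := by
    intro ks xs h
    rw [PySem.Set.update_eq_append_filter]
    have hnil : (PySem.Set.ofList xs).filter (fun y => !PySem.Set.contains ks y) = [] := by
      rw [List.filter_eq_nil_iff]
      intro a ha
      have hm := (PySem.Set.mem_ofList xs a).mp ha
      simp only [Bool.not_eq_true', Bool.not_eq_false]
      exact (PySem.Set.contains_iff ks a).mpr (h a hm)
    rw [hnil, List.append_nil]
  have hd0getD : ∀ t : Int, (((PySem.List.pyRange 0 10 1).foldl (fun d i => d.insert i []) PySem.Dict.empty : PySem.Dict Int (List (Int × Int)))).getD t [] = [] := by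
    intro t
    rw [pv_getD_foldl_insert_fun _ (PySem.List.nodup_pyRange_one 0 10) (fun _ => []) _ t []]
    split
    · rfl
    · exact PySem.Dict.getD_empty t []
  have hd0keys : (((PySem.List.pyRange 0 10 1).foldl (fun d i => d.insert i []) PySem.Dict.empty : PySem.Dict Int (List (Int × Int)))).keys = PySem.List.pyRange 0 10 1 := by decide
  have hfold1 : ∀ d : PySem.Dict Int (List (Int × Int)), (PySem.List.pyRange 1 50 1).foldl (fun d n => if ex.contains n then d else d.modify (PySem.Int.mod n 10) [] (fun l => l ++ [(n, fr.getD n 0)])) d = (((PySem.List.pyRange 1 50 1).filter (fun n => !ex.contains n)).map (fun n => (PySem.Int.mod n 10, (n, fr.getD n 0)))).foldl (fun d p => d.modify p.1 [] (fun l => l ++ [p.2])) d := by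
    intro d
    rw [List.foldl_map, List.foldl_filter]
    have hf : (fun (d : PySem.Dict Int (List (Int × Int))) n => if ex.contains n = true then d else d.modify (PySem.Int.mod n 10) [] (fun l => l ++ [(n, fr.getD n 0)])) = (fun d n => if (!ex.contains n) = true then d.modify (PySem.Int.mod n 10) [] (fun l => l ++ [(n, fr.getD n 0)]) else d) := by
      funext d n
      cases h : ex.contains n <;> simp
    rw [hf]
  have h1getD : ∀ t : Int, ((PySem.List.pyRange 1 50 1).foldl (fun d n => if ex.contains n then d else d.modify (PySem.Int.mod n 10) [] (fun l => l ++ [(n, fr.getD n 0)])) ((PySem.List.pyRange 0 10 1).foldl (fun d i => d.insert i []) PySem.Dict.empty)).getD t [] = ((PySem.List.pyRange 1 50 1).filter (fun n => PySem.Int.mod n 10 == t && !ex.contains n)).map (fun n => (n, fr.getD n 0)) := by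
    intro t
    rw [hfold1, PySem.Dict.getD_foldl_modify_append, hd0getD, List.nil_append]
    rw [List.filter_map, List.map_map, List.filter_filter]
    rfl
  have h1keys : ((PySem.List.pyRange 1 50 1).foldl (fun d n => if ex.contains n then d else d.modify (PySem.Int.mod n 10) [] (fun l => l ++ [(n, fr.getD n 0)])) ((PySem.List.pyRange 0 10 1).foldl (fun d i => d.insert i []) PySem.Dict.empty)).keys = PySem.List.pyRange 0 10 1 := by
    rw [hfold1]
    have hk := PySem.Dict.keys_foldl_modify_key (((PySem.List.pyRange 1 50 1).filter (fun n => !ex.contains n)).map (fun n => (PySem.Int.mod n 10, (n, fr.getD n 0)))) (fun p => p.1) [] (fun _ p => fun l => l ++ [p.2]) ((PySem.List.pyRange 0 10 1).foldl (fun d i => d.insert i []) PySem.Dict.empty)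
    refine hk.trans ?_
    rw [hd0keys, List.map_map]
    apply hupd
    intro x hx
    rw [List.mem_map] at hx
    obtain ⟨n, _, hn⟩ := hx
    have : x = PySem.Int.mod n 10 := by rw [← hn]; rfl
    subst this
    exact PySem.List.mem_pyRange_one.mpr ⟨PySem.Int.mod_nonneg n (by norm_num), PySem.Int.mod_lt n (by norm_num)⟩
  rw [h1keys]
  apply PySem.Dict.ext
  have h2keys : (((PySem.List.pyRange 0 10 1)).foldl (fun d t => d.modify t [] (fun l => PySem.List.sorted l (fun x => x.2) true)) ((PySem.List.pyRange 1 50 1).foldl (fun d n => if ex.contains n then d else d.modify (PySem.Int.mod n 10) [] (fun l => l ++ [(n, fr.getD n 0)])) ((PySem.List.pyRange 0 10 1).foldl (fun d i => d.insert i []) PySem.Dict.empty))).keys = PySem.List.pyRange 0 10 1 := by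
    have hk := PySem.Dict.keys_foldl_modify (PySem.List.pyRange 0 10 1) [] (fun _ _ => fun l => PySem.List.sorted l (fun x => x.2) true) ((PySem.List.pyRange 1 50 1).foldl (fun d n => if ex.contains n then d else d.modify (PySem.Int.mod n 10) [] (fun l => l ++ [(n, fr.getD n 0)])) ((PySem.List.pyRange 0 10 1).foldl (fun d i => d.insert i []) PySem.Dict.empty))
    refine hk.trans ?_
    rw [h1keys]
    exact hupd _ _ (fun x hx => hx)
  have hGkeys : (pvG ex fr).keys = PySem.List.pyRange 0 10 1 := by
    rw [pvG, PySem.Dict.keys_foldl_insert]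
    decide
  rw [PySem.Dict.items_eq_map_keys _ (by rw [h2keys]; exact PySem.List.nodup_pyRange_one 0 10) ([] : List (Int × Int))]
  rw [PySem.Dict.items_eq_map_keys _ (by rw [hGkeys]; exact PySem.List.nodup_pyRange_one 0 10) ([] : List (Int × Int))]
  rw [h2keys, hGkeys]
  apply List.map_congr_left
  intro t ht
  rw [pv_getD_foldl_modify_fun _ (PySem.List.nodup_pyRange_one 0 10), pv_pvG_getD, if_pos ht, if_pos ht, h1getD]
  rfl

-- A-side loop: the while loop emits round-robin, i.e. take 6 of pvPref
theorem pv_tbbWhile_of_ge (G : PySem.Dict Int (List (Int × Int))) (av : List Int) (fuel : Nat) (sel : List Int) (idx : PySem.Dict Int Int) (h : 6 ≤ sel.length) :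
    tbbWhile G av fuel sel idx = sel := by
  cases fuel with
  | zero => rfl
  | succ fuel => simp only [tbbWhile]; rw [if_neg (by omega)]

theorem pv_pref_succ (G : PySem.Dict Int (List (Int × Int))) (av : List Int) (j : Nat) :
    pvPref G av (j+1) = pvPref G av j ++ pvRow G av j := by
  unfold pvPref
  rw [List.range_succ, List.flatMap_append, List.flatMap_cons, List.flatMap_nil, List.append_nil]

theorem pv_row_nil (G : PySem.Dict Int (List (Int × Int))) (av : List Int) (r : Nat)
    (h : ∀ t ∈ av, (pvGt G t).length ≤ r) : pvRow G av r = [] := by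
  unfold pvRow
  rw [List.filterMap_eq_nil_iff]
  intro t ht
  exact List.getElem?_eq_none (h t ht)

theorem pv_pref_split (G : PySem.Dict Int (List (Int × Int))) (av : List Int) (j k : Nat) (h : j ≤ k) :
    ∃ rest, pvPref G av k = pvPref G av j ++ rest := by
  induction k, h using Nat.le_induction with
  | base => exact ⟨[], by rw [List.append_nil]⟩
  | succ k hk ih =>
    obtain ⟨rest, hrest⟩ := ih
    exact ⟨rest ++ pvRow G av k, by rw [pv_pref_succ, hrest, List.append_assoc]⟩

theorem pv_pref_stab (G : PySem.Dict Int (List (Int × Int))) (av : List Int) (m : Nat)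
    (h : ∀ t ∈ av, (pvGt G t).length ≤ m) : ∀ k, m ≤ k → pvPref G av k = pvPref G av m := by
  intro k hk
  induction k, hk using Nat.le_induction with
  | base => rfl
  | succ k hk ih =>
    rw [pv_pref_succ, pv_row_nil G av k (fun t ht => le_trans (h t ht) hk), List.append_nil, ih]

theorem pv_mem_pref (G : PySem.Dict Int (List (Int × Int))) (av : List Int) (j : Nat) (n : Int)
    (h : n ∈ pvPref G av j) : ∃ t' ∈ av, ∃ r, r < j ∧ (pvGt G t')[r]? = some n := by
  unfold pvPref at h
  obtain ⟨r, hr, hn⟩ := List.mem_flatMap.mp h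
  obtain ⟨t', ht', hsome⟩ := List.mem_filterMap.mp hn
  exact ⟨t', ht', r, List.mem_range.mp hr, hsome⟩

theorem pv_fold (G : PySem.Dict Int (List (Int × Int))) (av : List Int) (H : PvH G av) (j : Nat) :
    ∀ (av2 done : List Int) (sel : List Int) (idx : PySem.Dict Int Int),
    av = done ++ av2 →
    sel = (pvPref G av j ++ done.filterMap (fun t => (pvGt G t)[j]?)).take 6 →
    ((pvPref G av j ++ done.filterMap (fun t => (pvGt G t)[j]?)).length < 6 →
      ∀ t ∈ av, idx.getD t 0 = ((if t ∈ done then min (j+1) (pvGt G t).length else min j (pvGt G t).length : Nat) : Int)) →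
    (av2.foldl (tbbStep G) (sel, idx)).1 = (pvPref G av (j+1)).take 6 ∧
    ((pvPref G av (j+1)).length < 6 →
      ∀ t ∈ av, (av2.foldl (tbbStep G) (sel, idx)).2.getD t 0 = ((min (j+1) (pvGt G t).length : Nat) : Int)) := by
  intro av2
  induction av2 with
  | nil =>
    intro done sel idx hav hsel hidx
    rw [List.append_nil] at hav
    subst hav
    rw [List.foldl_nil]
    refine ⟨hsel.trans (by rw [pv_pref_succ]; rfl), ?_⟩
    intro hlen t htav
    rw [pv_pref_succ] at hlen
    have := hidx hlen t htav
    rwa [if_pos htav] at this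
  | cons t av2 ih =>
    intro done sel idx hav hsel hidx
    rw [List.foldl_cons]
    have htav : t ∈ av := by rw [hav]; exact List.mem_append_right _ List.mem_cons_self
    have htnd : t ∉ done := by
      have hnd := H.nd
      rw [hav, List.nodup_append] at hnd
      intro hx
      exact hnd.2.2 t hx t List.mem_cons_self rfl
    have hav' : av = (done ++ [t]) ++ av2 := by rw [hav, List.append_assoc]; rfl
    have hmemif : ∀ t' : Int, t' ≠ t → ((t' ∈ done ++ [t]) ↔ (t' ∈ done)) := by
      intro t' htt
      rw [List.mem_append, List.mem_singleton]
      exact ⟨fun h => h.elim id (fun h => absurd h htt), Or.inl⟩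
    by_cases h6 : 6 ≤ sel.length
    · -- Python's `break`: once 6 numbers are selected the pass skips every remaining tail
      have hstep : tbbStep G (sel, idx) t = (sel, idx) := by
        simp only [tbbStep]
        rw [if_pos h6]
      rw [hstep]
      have hXlen : 6 ≤ (pvPref G av j ++ done.filterMap (fun t => (pvGt G t)[j]?)).length := by
        rcases Nat.lt_or_ge (pvPref G av j ++ done.filterMap (fun t => (pvGt G t)[j]?)).length 6 with h | h
        · rw [hsel, List.take_of_length_le (by omega)] at h6; omega
        · exact h
      refine ih (done ++ [t]) sel idx hav' ?_ ?_
      · rw [List.filterMap_append, ← List.append_assoc, List.take_append_of_le_length hXlen]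
        exact hsel
      · intro hlen
        exfalso
        rw [List.filterMap_append, ← List.append_assoc, List.length_append] at hlen
        omega
    · have hXlt : (pvPref G av j ++ done.filterMap (fun t => (pvGt G t)[j]?)).length < 6 := by
        by_contra h
        rw [hsel, List.length_take] at h6
        omega
      have hselX : sel = pvPref G av j ++ done.filterMap (fun t => (pvGt G t)[j]?) := by
        rw [hsel, List.take_of_length_le (by omega)]
      have hidxt : idx.getD t 0 = ((min j (pvGt G t).length : Nat) : Int) := by
        have := hidx hXlt t htav
        rwa [if_neg htnd] at this
      have hlenG : (G.getD t []).length = (pvGt G t).length := by simp [pvGt]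
      by_cases hjl : j < (pvGt G t).length
      · -- this tail still has an unemitted number: Python appends it and advances the cursor
        have hmin : min j (pvGt G t).length = j := Nat.min_eq_left (le_of_lt hjl)
        have hguard : idx.getD t 0 < ((G.getD t []).length : Int) := by
          rw [hidxt, hmin, hlenG]
          exact_mod_cast hjl
        have hjG : j < (G.getD t []).length := by omega
        have hnum : (PySem.List.pyGetD (G.getD t []) (idx.getD t 0) (0, 0)).1 = (pvGt G t)[j]'hjl := by
          rw [hidxt, hmin, PySem.List.pyGetD_natCast, List.getD_eq_getElem _ _ hjG]
          simp only [pvGt, List.getElem_map]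
        have hnotmem : (pvGt G t)[j]'hjl ∉ sel := by
          rw [hselX]
          intro hmem
          rcases List.mem_append.mp hmem with hm | hm
          · obtain ⟨t', ht', r, hr, hsome⟩ := pv_mem_pref G av j _ hm
            by_cases htt : t' = t
            · subst htt
              obtain ⟨hrl, hval⟩ := List.getElem?_eq_some_iff.mp hsome
              have := ((H.ndg t').getElem_inj_iff).mp hval
              omega
            · have h1 := H.tail_eq t' ht' _ (List.mem_of_getElem? hsome)
              have h2 := H.tail_eq t htav _ (List.getElem_mem hjl)
              exact htt (h1.symm.trans h2)
          · obtain ⟨t', ht', hsome⟩ := List.mem_filterMap.mp hm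
            have htt : t' ≠ t := fun h => htnd (h ▸ ht')
            have h1 := H.tail_eq t' (by rw [hav]; exact List.mem_append_left _ ht') _ (List.mem_of_getElem? hsome)
            have h2 := H.tail_eq t htav _ (List.getElem_mem hjl)
            exact htt (h1.symm.trans h2)
        have hstep : tbbStep G (sel, idx) t = (sel ++ [(pvGt G t)[j]'hjl], idx.modify t 0 (· + 1)) := by
          simp only [tbbStep]
          rw [if_neg h6, if_pos hguard, hnum, if_neg (fun hc => hnotmem (List.contains_iff_mem.mp hc))]
        rw [hstep]
        have hrowext : (done ++ [t]).filterMap (fun t => (pvGt G t)[j]?) = done.filterMap (fun t => (pvGt G t)[j]?) ++ [(pvGt G t)[j]'hjl] := by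
          rw [List.filterMap_append, List.filterMap_cons, List.filterMap_nil, List.getElem?_eq_getElem hjl]
        refine ih (done ++ [t]) _ _ hav' ?_ ?_
        · rw [hrowext, ← List.append_assoc, List.take_of_length_le (by rw [← hselX, List.length_append]; simp; omega), hselX]
        · intro hlen t' ht'
          by_cases htt : t' = t
          · subst htt
            rw [PySem.Dict.getD_modify_self, hidxt, hmin, if_pos (List.mem_append_right _ List.mem_cons_self)]
            rw [Nat.min_eq_left hjl]
            push_cast
            ring
          · rw [PySem.Dict.getD_modify_of_ne _ _ _ htt]
            have := hidx hXlt t' ht'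
            rw [this]
            by_cases hd : t' ∈ done
            · rw [if_pos hd, if_pos ((hmemif t' htt).mpr hd)]
            · rw [if_neg hd, if_neg (fun h => hd ((hmemif t' htt).mp h))]
      · -- this tail is exhausted: Python skips it
        have hmin : min j (pvGt G t).length = (pvGt G t).length := Nat.min_eq_right (by omega)
        have hguard : ¬ (idx.getD t 0 < ((G.getD t []).length : Int)) := by
          rw [hidxt, hmin, hlenG]
          exact_mod_cast Nat.lt_irrefl _
        have hstep : tbbStep G (sel, idx) t = (sel, idx) := by
          simp only [tbbStep]
          rw [if_neg h6, if_neg hguard]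
        rw [hstep]
        have hrowext : (done ++ [t]).filterMap (fun t => (pvGt G t)[j]?) = done.filterMap (fun t => (pvGt G t)[j]?) := by
          rw [List.filterMap_append, List.filterMap_cons, List.filterMap_nil, List.getElem?_eq_none (by omega), List.append_nil]
        refine ih (done ++ [t]) _ _ hav' ?_ ?_
        · rw [hrowext]; exact hsel
        · intro hlen t' ht'
          by_cases htt : t' = t
          · subst htt
            rw [hidxt, hmin, if_pos (List.mem_append_right _ List.mem_cons_self), Nat.min_eq_right (by omega)]
          · have := hidx hXlt t' ht'
            rw [this]
            by_cases hd : t' ∈ done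
            · rw [if_pos hd, if_pos ((hmemif t' htt).mpr hd)]
            · rw [if_neg hd, if_neg (fun h => hd ((hmemif t' htt).mp h))]

theorem pv_while (G : PySem.Dict Int (List (Int × Int))) (av : List Int) (H : PvH G av) :
    ∀ (fuel j : Nat) (idx : PySem.Dict Int Int), j ≤ 5 → 5 - j < fuel →
    ((pvPref G av j).length < 6 → ∀ t ∈ av, idx.getD t 0 = ((min j (pvGt G t).length : Nat) : Int)) →
    tbbWhile G av fuel ((pvPref G av j).take 6) idx = (pvPref G av 5).take 6 := by
  intro fuel
  induction fuel with
  | zero => intro j idx hj hf; omega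
  | succ fuel ih =>
    intro j idx hj hf hidx
    have hstab := pv_pref_stab G av 5 H.len5
    have key : (6 ≤ (pvPref G av (j+1)).length ∨ (∀ t ∈ av, (pvGt G t).length ≤ j+1)) →
        (pvPref G av (j+1)).take 6 = (pvPref G av 5).take 6 := by
      intro hc
      rcases Nat.lt_or_ge j 5 with hj5 | hj5
      · rcases hc with hc | hc
        · obtain ⟨rest, hrest⟩ := pv_pref_split G av (j+1) 5 (by omega)
          rw [hrest, List.take_append_of_le_length hc]
        · rw [pv_pref_stab G av (j+1) hc 5 (by omega)]
      · have hj5' : j = 5 := by omega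
        subst hj5'
        rw [hstab 6 (by omega)]
    simp only [tbbWhile]
    by_cases hlt : ((pvPref G av j).take 6).length < 6
    · rw [if_pos hlt]
      have hPlt : (pvPref G av j).length < 6 := by rw [List.length_take] at hlt; omega
      have hfold := pv_fold G av H j av [] ((pvPref G av j).take 6) idx rfl
        (by simp) (by intro h t ht
                      rw [if_neg List.not_mem_nil]
                      exact hidx hPlt t ht)
      obtain ⟨hst1, hst2⟩ := hfold
      by_cases hall : av.all (fun t => decide (((G.getD t []).length : Int) ≤ (av.foldl (tbbStep G) ((pvPref G av j).take 6, idx)).2.getD t 0)) = true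
      · rw [if_pos hall, hst1]
        apply key
        by_cases hP6 : 6 ≤ (pvPref G av (j+1)).length
        · exact Or.inl hP6
        · refine Or.inr (fun t ht => ?_)
          have hd := of_decide_eq_true (List.all_eq_true.mp hall t ht)
          rw [hst2 (by omega) t ht] at hd
          have hlG : (G.getD t []).length = (pvGt G t).length := by simp [pvGt]
          rw [hlG] at hd
          have : (pvGt G t).length ≤ min (j+1) (pvGt G t).length := by exact_mod_cast hd
          omega
      · rw [if_neg hall]
        by_cases hP6 : 6 ≤ (pvPref G av (j+1)).length
        · have h6st : 6 ≤ (av.foldl (tbbStep G) ((pvPref G av j).take 6, idx)).1.length := by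
            rw [hst1, List.length_take]; omega
          rw [pv_tbbWhile_of_ge _ _ _ _ _ h6st, hst1]
          exact key (Or.inl hP6)
        · have hPlt' : (pvPref G av (j+1)).length < 6 := by omega
          have hex : ∃ t ∈ av, ¬ (((G.getD t []).length : Int) ≤ (av.foldl (tbbStep G) ((pvPref G av j).take 6, idx)).2.getD t 0) := by
            by_contra hc
            push Not at hc
            exact hall (List.all_eq_true.mpr (fun t ht => decide_eq_true (hc t ht)))
          obtain ⟨t, ht, hgt⟩ := hex
          rw [hst2 hPlt' t ht] at hgt
          have hlG : (G.getD t []).length = (pvGt G t).length := by simp [pvGt]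
          rw [hlG] at hgt
          have hlt' : j + 1 < (pvGt G t).length := by
            by_contra hcon
            have hle : (pvGt G t).length ≤ j + 1 := by omega
            rw [Nat.min_eq_right hle] at hgt
            exact hgt (le_refl _)
          have hj5 : j + 1 ≤ 5 := by have := H.len5 t ht; omega
          have hih := ih (j+1) (av.foldl (tbbStep G) ((pvPref G av j).take 6, idx)).2 hj5 (by omega) (hst2)
          rw [← hst1] at hih
          exact hih
    · rw [if_neg hlt]
      have h6 : 6 ≤ (pvPref G av j).length := by rw [List.length_take] at hlt; omega
      obtain ⟨rest, hrest⟩ := pv_pref_split G av j 5 hj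
      rw [hrest, List.take_append_of_le_length h6]

-- B-side: the single stable sort of entries is exactly the round-robin emission
theorem pv_entries (G : PySem.Dict Int (List (Int × Int))) (av : List Int) (H : PvH G av) :
    PySem.List.sorted ((PySem.List.enumerate av 0).flatMap (fun pt => (PySem.List.enumerate (G.getD pt.2 []) 0).map (fun rp => (rp.1 * 10 + pt.1, rp.2.1)))) (fun e => e.1) false
    = (List.range 5).flatMap (fun (r : Nat) => (PySem.List.enumerate av 0).filterMap (fun pt => ((pvGt G pt.2)[r]?).map (fun n => ((0 + (r : Int)) * 10 + pt.1, n)))) := by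
  have hrowopt : ∀ (r : Nat) (pt : Int × Int), ((PySem.List.enumerate (G.getD pt.2 []) 0).map (fun rp => (rp.1 * 10 + pt.1, rp.2.1)))[r]? = ((pvGt G pt.2)[r]?).map (fun n => ((0 + (r : Int)) * 10 + pt.1, n)) := by
    intro r pt
    rw [List.getElem?_map, PySem.List.getElem?_enumerate]
    unfold pvGt
    rw [List.getElem?_map]
    cases (G.getD pt.2 [])[r]? <;> simp
  have hptmem : ∀ pt ∈ PySem.List.enumerate av 0, pt.2 ∈ av ∧ 0 ≤ pt.1 ∧ pt.1 < 10 := by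
    intro pt hpt
    obtain ⟨k, hk, hpteq⟩ := (PySem.List.mem_enumerate_iff av 0 pt).mp hpt
    subst hpteq
    refine ⟨List.getElem_mem hk, by simp, ?_⟩
    have := H.len10
    simp only [zero_add]
    exact_mod_cast lt_of_lt_of_le hk this
  have hperm : ((List.range 5).flatMap (fun (r : Nat) => (PySem.List.enumerate av 0).filterMap (fun pt => ((pvGt G pt.2)[r]?).map (fun n => ((0 + (r : Int)) * 10 + pt.1, n))))).Perm ((PySem.List.enumerate av 0).flatMap (fun pt => (PySem.List.enumerate (G.getD pt.2 []) 0).map (fun rp => (rp.1 * 10 + pt.1, rp.2.1)))) := by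
    have hlen : ∀ l ∈ (PySem.List.enumerate av 0).map (fun pt => (PySem.List.enumerate (G.getD pt.2 []) 0).map (fun rp => (rp.1 * 10 + pt.1, rp.2.1))), l.length ≤ 5 := by
      intro l hl
      obtain ⟨pt, hpt, hleq⟩ := List.mem_map.mp hl
      subst hleq
      rw [List.length_map, PySem.List.length_enumerate]
      have h5 := H.len5 pt.2 (hptmem pt hpt).1
      rw [pvGt, List.length_map] at h5
      exact h5
    have hL := pv_transpose ((PySem.List.enumerate av 0).map (fun pt => (PySem.List.enumerate (G.getD pt.2 []) 0).map (fun rp => (rp.1 * 10 + pt.1, rp.2.1)))) 5 hlen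
    rw [← List.flatMap_def] at hL
    have hrw : (fun (r : Nat) => ((PySem.List.enumerate av 0).map (fun pt => (PySem.List.enumerate (G.getD pt.2 []) 0).map (fun rp => (rp.1 * 10 + pt.1, rp.2.1)))).filterMap (fun l => l[r]?))
        = (fun (r : Nat) => (PySem.List.enumerate av 0).filterMap (fun pt => ((pvGt G pt.2)[r]?).map (fun n => ((0 + (r : Int)) * 10 + pt.1, n)))) := by
      funext r
      rw [List.filterMap_map]
      apply congrArg (fun F => List.filterMap F (PySem.List.enumerate av 0))
      funext pt
      exact hrowopt r pt
    rw [hrw] at hL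
    exact hL
  have hpw : List.Pairwise (fun (a b : Int × Int) => a.1 < b.1) ((List.range 5).flatMap (fun (r : Nat) => (PySem.List.enumerate av 0).filterMap (fun pt => ((pvGt G pt.2)[r]?).map (fun n => ((0 + (r : Int)) * 10 + pt.1, n))))) := by
    have hshape : ∀ (r : Nat) (x : Int × Int), x ∈ (PySem.List.enumerate av 0).filterMap (fun pt => ((pvGt G pt.2)[r]?).map (fun n => ((0 + (r : Int)) * 10 + pt.1, n))) → ∃ p : Int, 0 ≤ p ∧ p < 10 ∧ x.1 = (r : Int) * 10 + p := by
      intro r x hx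
      obtain ⟨pt, hpt, hsome⟩ := List.mem_filterMap.mp hx
      obtain ⟨n, _, hn⟩ := Option.map_eq_some_iff.mp hsome
      obtain ⟨_, hp0, hp10⟩ := hptmem pt hpt
      exact ⟨pt.1, hp0, hp10, by rw [← hn]; push_cast; ring⟩
    rw [List.flatMap_def, List.pairwise_flatten]
    refine ⟨?_, ?_⟩
    · intro l hl
      obtain ⟨r, _, hleq⟩ := List.mem_map.mp hl
      subst hleq
      rw [List.pairwise_filterMap]
      refine (PySem.List.pairwise_lt_enumerate av 0).imp ?_
      intro pt pt' hlt b hb b' hb'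
      obtain ⟨n, _, hn⟩ := Option.map_eq_some_iff.mp hb
      obtain ⟨n', _, hn'⟩ := Option.map_eq_some_iff.mp hb'
      rw [← hn, ← hn']
      simpa using hlt
    · rw [List.pairwise_map]
      refine List.pairwise_lt_range.imp ?_
      intro r r' hrr x hx y hy
      obtain ⟨p, hp0, hp10, hxp⟩ := hshape r x hx
      obtain ⟨q, hq0, _, hyq⟩ := hshape r' y hy
      rw [hxp, hyq]
      have hrr' : (r : Int) < (r' : Int) := by exact_mod_cast hrr
      nlinarith
  exact PySem.List.sorted_eq_of_perm_of_pairwise_lt _ _ _ hperm hpw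

theorem pv_B_core (ex : List Int) (fr : PySem.Dict Int Int) :
    PySem.List.sorted ((PySem.List.slice (PySem.List.sorted ((PySem.List.enumerate (pvAv ex fr) 0).flatMap (fun pt => (PySem.List.enumerate ((pvG ex fr).getD pt.2 []) 0).map (fun rp => (rp.1 * 10 + pt.1, rp.2.1)))) (fun e => e.1) false) none (some 6)).map (fun e => e.2)) (fun x => x) false = pvOut ex fr := by
  rw [pv_entries (pvG ex fr) (pvAv ex fr) (pv_H ex fr)]
  rw [PySem.List.slice_to _ (by norm_num : (0:Int) ≤ 6)]
  have hsnd : ((List.range 5).flatMap (fun (r : Nat) => (PySem.List.enumerate (pvAv ex fr) 0).filterMap (fun pt => ((pvGt (pvG ex fr) pt.2)[r]?).map (fun n => ((0 + (r : Int)) * 10 + pt.1, n))))).map (fun e => e.2) = pvPref (pvG ex fr) (pvAv ex fr) 5 := by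
    rw [List.map_flatMap]
    unfold pvPref pvRow
    apply congrArg (fun F => List.flatMap F (List.range 5))
    funext r
    exact pv_row_snd (pvAv ex fr) 0 (fun t => (pvGt (pvG ex fr) t)[r]?) (fun p => (0 + (r : Int)) * 10 + p)
  rw [List.map_take, hsnd]
  unfold pvOut
  rfl

theorem pv_A_core (ex : List Int) (fr : PySem.Dict Int Int) :
    PySem.List.sorted (PySem.List.slice (tbbWhile (pvG ex fr) (pvAv ex fr) 7 [] ((PySem.List.pyRange 0 10 1).foldl (fun d t => d.insert t 0) PySem.Dict.empty)) none (some 6)) (fun x => x) false = pvOut ex fr := by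
  have hidx0 : ∀ t : Int, (((PySem.List.pyRange 0 10 1).foldl (fun d t => d.insert t 0) PySem.Dict.empty : PySem.Dict Int Int)).getD t 0 = 0 := by
    intro t
    rw [pv_getD_foldl_insert_fun _ (PySem.List.nodup_pyRange_one 0 10) (fun _ => (0:Int)) _ t 0]
    split
    · rfl
    · exact PySem.Dict.getD_empty t 0
  have hwhile := pv_while (pvG ex fr) (pvAv ex fr) (pv_H ex fr) 7 0 ((PySem.List.pyRange 0 10 1).foldl (fun d t => d.insert t 0) PySem.Dict.empty) (by omega) (by omega)
    (by intro _ t _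
        rw [hidx0 t]
        simp)
  have h0 : (pvPref (pvG ex fr) (pvAv ex fr) 0).take 6 = [] := by simp [pvPref]
  rw [h0] at hwhile
  rw [hwhile, PySem.List.slice_to _ (by norm_num : (0:Int) ≤ 6)]
  unfold pvOut
  rw [show Int.toNat 6 = 6 from rfl, List.take_take]
  norm_num

theorem pv_A_eq (history : List (List (String × List Int))) (window : Int) (exclude : Option (List Int)) :
    tail_balance_bet history window exclude = pvOut (pvEx exclude) (pvFr history window) := by
  simp only [tail_balance_bet]
  rw [pv_A_dict (exclude.getD []) (PySem.Dict.counter ((PySem.List.slice history (some (-window)) none).flatMap (fun d => (List.lookup "numbers" d).getD [])))]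
  exact pv_A_core (exclude.getD []) (PySem.Dict.counter ((PySem.List.slice history (some (-window)) none).flatMap (fun d => (List.lookup "numbers" d).getD [])))

theorem pv_B_eq (history : List (List (String × List Int))) (window : Int) (exclude : Option (List Int)) :
    tail_balance_bet_alt history window exclude = pvOut (pvEx exclude) (pvFr history window) := by
  simp only [tail_balance_bet_alt]
  exact pv_B_core (exclude.getD []) (PySem.Dict.counter ((PySem.List.slice history (some (-window)) none).flatMap (fun d => (List.lookup "numbers" d).getD [])))

-- ===== VERDICT (by name: the statement is the Claim_ definition above) =====
theorem tail_balance_bet_spec : Claim_equal_tail_balance_bet := by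
  intro history window exclude _hdom _hpre
  unfold Spec_tail_balance_bet
  rw [pv_A_eq, pv_B_eq]
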